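-- pv_equiv track=rewrite | github.com/arc-web/google-ads-agent | shared/rebuild/revision_feedback.py | source_base_campaign
-- ===== SOURCE A (Python) =====
-- def source_base_campaign(rows: list[dict[str, str]]) -> str:
--     for row in rows:
--         campaign = row.get("Campaign", "")
--         if row.get("Campaign Type") == "Search" and campaign:
--             return campaign
--     for row in rows:
--         if row.get("Campaign"):
--             return row["Campaign"]
--     return "ARC - Search - Services - V1"
-- ===== SOURCE B (Python) =====
-- def source_base_campaign(rows: list[dict[str, str]]) -> str:
--     fallback = None
--     for row in rows:
--         campaign = row.get("Campaign", "")
--         if campaign: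
--             if row.get("Campaign Type") == "Search":
--                 return campaign
--             if fallback is None:
--                 fallback = campaign
--     return fallback if fallback is not None else "ARC - Search - Services - V1"
-- ===== Notes on version B (the rewrite author's own statement) =====
-- stated objective: simpler
-- what changed: Replaces A's two passes over rows by a single pass that returns a non-empty Search campaign immediately and records only the first non-empty campaign as a fallback.
import Mathlib
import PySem

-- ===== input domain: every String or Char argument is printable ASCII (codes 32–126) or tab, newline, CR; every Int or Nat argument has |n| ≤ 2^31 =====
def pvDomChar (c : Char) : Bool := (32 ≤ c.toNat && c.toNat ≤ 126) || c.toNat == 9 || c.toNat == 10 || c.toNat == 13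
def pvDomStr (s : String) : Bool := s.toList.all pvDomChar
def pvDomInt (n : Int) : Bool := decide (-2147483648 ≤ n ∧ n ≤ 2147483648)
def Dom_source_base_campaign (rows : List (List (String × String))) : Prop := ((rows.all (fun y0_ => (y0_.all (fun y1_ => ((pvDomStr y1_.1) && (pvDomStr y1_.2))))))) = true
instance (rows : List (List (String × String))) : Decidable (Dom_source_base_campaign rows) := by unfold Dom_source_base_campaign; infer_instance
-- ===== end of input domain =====

-- B merges A's two passes into a single loop with a first-non-empty fallback; objective: simpler.

-- ===== PORT A =====
-- first pass: first row with Campaign Type == "Search" and non-empty Campaign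
def pvA_pass1 (rows : List (List (String × String))) : Option String :=
  match rows with
  | [] => none
  | row :: rest =>
    let campaign := PySem.Dict.getD (PySem.Dict.ofList row) "Campaign" ""
    if PySem.Dict.get? (PySem.Dict.ofList row) "Campaign Type" == some "Search" && campaign != "" then
      some campaign
    else pvA_pass1 rest

-- second pass: first row whose Campaign is present and non-empty, return row["Campaign"]
def pvA_pass2 (rows : List (List (String × String))) : Option String :=
  match rows with
  | [] => none
  | row :: rest =>
    match PySem.Dict.get? (PySem.Dict.ofList row) "Campaign" with
    | some c => if c != "" then some c else pvA_pass2 rest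
    | none => pvA_pass2 rest

def source_base_campaign (rows : List (List (String × String))) : String :=
  match pvA_pass1 rows with
  | some c => c
  | none =>
    match pvA_pass2 rows with
    | some c => c
    | none => "ARC - Search - Services - V1"

-- ===== PORT B =====
def pvB_loop (rows : List (List (String × String))) (fallback : Option String) : String :=
  match rows with
  | [] => match fallback with
          | some f => f
          | none => "ARC - Search - Services - V1"
  | row :: rest =>
    let campaign := PySem.Dict.getD (PySem.Dict.ofList row) "Campaign" ""
    if campaign != "" then
      if PySem.Dict.get? (PySem.Dict.ofList row) "Campaign Type" == some "Search" then campaign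
      else pvB_loop rest (match fallback with | none => some campaign | some f => some f)
    else pvB_loop rest fallback

def source_base_campaign_alt (rows : List (List (String × String))) : String :=
  pvB_loop rows none

-- ===== PRECONDITION & SPEC =====
def Spec_source_base_campaign (rows : List (List (String × String))) (out : String) : Prop := out = source_base_campaign_alt rows
instance (rows : List (List (String × String))) (out : String) : Decidable (Spec_source_base_campaign rows out) := by unfold Spec_source_base_campaign; infer_instance

-- ===== CLAIM (what is proved, stated in full; the proofs are below) =====
def Claim_equal_source_base_campaign : Prop := ∀ (rows : List (List (String × String))), Dom_source_base_campaign rows → Spec_source_base_campaign rows (source_base_campaign rows)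

-- ===== LEMMAS AND PROOFS =====

-- main loop invariant
lemma pvB_loop_char (rows : List (List (String × String))) (fb : Option String) :
    pvB_loop rows fb =
      match pvA_pass1 rows with
      | some c => c
      | none =>
        match fb with
        | some f => f
        | none =>
          match pvA_pass2 rows with
          | some c => c
          | none => "ARC - Search - Services - V1" := by
  induction rows generalizing fb with
  | nil => cases fb <;> simp [pvB_loop, pvA_pass1, pvA_pass2]
  | cons row rest ih =>
    cases hc : PySem.Dict.get? (PySem.Dict.ofList row) "Campaign" with
    | none =>
      simp [pvB_loop, pvA_pass1, pvA_pass2, PySem.Dict.getD_eq_get?_getD, hc, ih]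
    | some c =>
      by_cases hcne : c = ""
      · subst hcne
        simp [pvB_loop, pvA_pass1, pvA_pass2, PySem.Dict.getD_eq_get?_getD, hc, ih]
      · by_cases hs : PySem.Dict.get? (PySem.Dict.ofList row) "Campaign Type" = some "Search"
        · simp [pvB_loop, pvA_pass1, PySem.Dict.getD_eq_get?_getD, hc, hs, hcne]
        · have hs' : (PySem.Dict.get? (PySem.Dict.ofList row) "Campaign Type" == some "Search") = false := by
            simp [hs]
          have hcne' : (c != "") = true := by simp [hcne]
          simp only [pvB_loop, pvA_pass1, pvA_pass2, PySem.Dict.getD_eq_get?_getD, hc,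
            Option.getD_some, hs', hcne', Bool.false_and, if_true, if_false, Bool.false_eq_true]
          rw [ih]
          cases pvA_pass1 rest <;> cases fb <;> simp

-- ===== VERDICT (by name: the statement is the Claim_ definition above) =====
theorem source_base_campaign_spec : Claim_equal_source_base_campaign := by
  intro rows _
  unfold Spec_source_base_campaign source_base_campaign source_base_campaign_alt
  rw [pvB_loop_char]
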